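-- pv_equiv track=rewrite | github.com/rrwt/daily-coding-challenge | daily_problems/problem_201_to_300/246.py | can_form_a_circle
-- ===== SOURCE A (Python) =====
-- from collections import defaultdict
-- from typing import List
--
-- def _can_form_a_circle(words: set, first: str, prev: str) -> bool:
--     if not words:
--         if prev[-1] == first[0]:
--             return True
--         return False
--
--     for word in words:
--         if word[0] == prev[-1]:
--             if _can_form_a_circle(words - {word}, first, word):
--                 return True
--
--     return False
--
-- def can_form_a_circle(words: List[str]) -> bool:
--     hashmap = defaultdict(int)
--
--     for word in words:
--         hashmap[word[0]] += 1
--         hashmap[word[-1]] += 1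
--
--     for value in hashmap.values():
--         if value < 2:
--             return False
--
--     words = set(words)
--
--     for word in words:
--         if _can_form_a_circle(words - {word}, word, word):
--             return True
--
--     return False
-- ===== SOURCE B (Python) =====
-- from collections import Counter
--
--
-- def can_form_a_circle(words):
--     counts = Counter()
--     for w in words:
--         counts[w[0]] += 1
--         counts[w[-1]] += 1
--     if any(v < 2 for v in counts.values()):
--         return False
--     ws = list(dict.fromkeys(words))
--     n = len(ws)
--     if n == 0:
--         return False
--     full = (1 << n) - 1
--     # reachable states (start, visited-mask, last) of simple char-matching paths
--     frontier = {(s, 1 << s, s) for s in range(n)}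
--     for _ in range(n - 1):
--         nxt = set()
--         for s, mask, i in frontier:
--             for j in range(n):
--                 if not (mask >> j) & 1 and ws[j][0] == ws[i][-1]:
--                     nxt.add((s, mask | (1 << j), j))
--         frontier = nxt
--     return any(mask == full and ws[i][-1] == ws[s][0] for s, mask, i in frontier)
-- ===== Notes on version B (the rewrite author's own statement) =====
-- stated objective: alternative
-- what changed: A's factorial backtracking DFS over shrinking word-sets is replaced by a Held-Karp style layered search over deduplicated (start, visited-bitmask, last-word) states, keeping A's degree-count quick-reject.
import Mathlib
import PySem

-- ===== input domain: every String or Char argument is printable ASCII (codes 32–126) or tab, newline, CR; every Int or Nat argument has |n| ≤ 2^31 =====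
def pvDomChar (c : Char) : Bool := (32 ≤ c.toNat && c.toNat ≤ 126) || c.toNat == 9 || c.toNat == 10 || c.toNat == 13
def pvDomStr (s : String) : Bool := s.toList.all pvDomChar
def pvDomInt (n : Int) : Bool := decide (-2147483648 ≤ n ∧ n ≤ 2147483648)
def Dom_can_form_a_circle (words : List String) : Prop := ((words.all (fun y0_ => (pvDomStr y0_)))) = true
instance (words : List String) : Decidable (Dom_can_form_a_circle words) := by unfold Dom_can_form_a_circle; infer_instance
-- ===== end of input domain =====

-- B replaces A's backtracking search over shrinking word-sets by a layered search over
-- deduplicated (start, visited-bitmask, last) states; return values agree on all lists of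
-- nonempty words (Pre_ excludes the empty word, where Python A raises IndexError).

-- ===== PORT A =====
-- w[0] / w[-1]; Pre_ excludes the empty word, where Python raises IndexError, so the .getD default is never the value used
def pvFirst (w : String) : Char := (PySem.Str.pyGet? w 0).getD ' '
def pvLast (w : String) : Char := (PySem.Str.pyGet? w (-1)).getD ' '

-- _can_form_a_circle(words, first, prev): backtracking over the set of remaining words
def pvSearch (ws : List String) (first prev : String) : Bool :=
  if ws = [] then pvLast prev == pvFirst first
  else
    ws.attach.any (fun ⟨w, _⟩ =>
      pvFirst w == pvLast prev && pvSearch (ws.erase w) first w)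
termination_by ws.length
decreasing_by
  have h1 : (ws.erase w).length = ws.length - 1 := List.length_erase_of_mem (by assumption)
  have h2 : 0 < ws.length := List.length_pos_of_mem (by assumption)
  omega

def can_form_a_circle (words : List String) : Bool :=
  let hashmap := words.foldl
    (fun d w => PySem.Dict.modify (PySem.Dict.modify d (pvFirst w) 0 (· + 1)) (pvLast w) 0 (· + 1))
    PySem.Dict.empty
  if (PySem.Dict.values hashmap).any (fun v => decide (v < 2)) then false
  else
    let s : PySem.Set String := PySem.Set.ofList words
    s.attach.any (fun ⟨w, _⟩ => pvSearch (s.erase w) w w)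

-- ===== PORT B =====
-- one layer of the reachable-state search: extend every (start, mask, last) state by one unused word
-- (indices are produced < ws.length, so the [ ]?.getD "" default is never the value used)
def pvStep (ws : List String) (fr : PySem.Set (Nat × Nat × Nat)) : PySem.Set (Nat × Nat × Nat) :=
  fr.foldl
    (fun nxt st =>
      (List.range ws.length).foldl
        (fun nxt2 j =>
          if (st.2.1 >>> j) % 2 == 0 &&
             pvFirst (ws[j]?.getD "") == pvLast (ws[st.2.2]?.getD "")
          then PySem.Set.add nxt2 (st.1, st.2.1 ||| (1 <<< j), j)
          else nxt2)
        nxt)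
    PySem.Set.empty

def can_form_a_circle_alt (words : List String) : Bool :=
  let counts := words.foldl
    (fun d w => PySem.Dict.modify (PySem.Dict.modify d (pvFirst w) 0 (· + 1)) (pvLast w) 0 (· + 1))
    PySem.Dict.empty
  if (PySem.Dict.values counts).any (fun v => decide (v < 2)) then false
  else
    let ws := PySem.List.dedup words
    let n := ws.length
    if n == 0 then false
    else
      let full := (1 <<< n) - 1
      let init : PySem.Set (Nat × Nat × Nat) :=
        PySem.Set.ofList ((List.range n).map (fun s => (s, 1 <<< s, s)))
      let fin := (List.range (n - 1)).foldl (fun fr _ => pvStep ws fr) init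
      fin.any (fun st =>
        st.2.1 == full && pvLast (ws[st.2.2]?.getD "") == pvFirst (ws[st.1]?.getD ""))

-- ===== PRECONDITION & SPEC =====
-- Pre_ excludes exactly the lists containing the empty word "", on which Python A raises IndexError (word[0]).
def Pre_can_form_a_circle (words : List String) : Prop := ∀ w ∈ words, w ≠ ""
instance (words : List String) : Decidable (Pre_can_form_a_circle words) := by
  unfold Pre_can_form_a_circle; infer_instance
def pvWitness_can_form_a_circle : List String := ["ab", "ba"]
def Spec_can_form_a_circle (words : List String) (out : Bool) : Prop := out = can_form_a_circle_alt words
instance (words : List String) (out : Bool) : Decidable (Spec_can_form_a_circle words out) := by unfold Spec_can_form_a_circle; infer_instance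

-- ===== CLAIM (what is proved, stated in full; the proofs are below) =====
def Claim_equal_can_form_a_circle : Prop := ∀ (words : List String), Dom_can_form_a_circle words → Pre_can_form_a_circle words → Spec_can_form_a_circle words (can_form_a_circle words)

-- ===== LEMMAS AND PROOFS =====

-- proof-only helpers: word accessor, word-chain (A's shape), index-path and bitmask (B's shape)
def pvAt (ws : List String) (j : Nat) : String := ws[j]?.getD ""

def pvChain (first prev : String) : List String → Bool
  | [] => pvLast prev == pvFirst first
  | w :: t => (pvFirst w == pvLast prev) && pvChain first w t

def pvCyc : List String → Bool
  | [] => false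
  | w :: t => pvChain w w t

def pvMask (il : List Nat) : Nat := il.foldl (fun m i => m ||| (1 <<< i)) 0

def pvIdxPath (ws : List String) : List Nat → Bool
  | [] => true
  | [_] => true
  | i :: j :: t => (pvFirst (pvAt ws j) == pvLast (pvAt ws i)) && pvIdxPath ws (j :: t)

def pvStateOK (ws : List String) (k : Nat) (st : Nat × Nat × Nat) : Prop :=
  ∃ il : List Nat, il.length = k + 1 ∧ il.Nodup ∧ (∀ j ∈ il, j < ws.length) ∧
    il.head? = some st.1 ∧ il.getLast? = some st.2.2 ∧ pvMask il = st.2.1 ∧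
    pvIdxPath ws il = true

theorem pv_mem_foldl_accum {β γ : Type} [BEq γ] [LawfulBEq γ]
    (F : PySem.Set γ → β → PySem.Set γ) (P : β → γ → Prop)
    (hF : ∀ acc b x, x ∈ F acc b ↔ x ∈ acc ∨ P b x) :
    ∀ (l : List β) (acc : PySem.Set γ) (x : γ),
      x ∈ l.foldl F acc ↔ x ∈ acc ∨ ∃ b ∈ l, P b x := by
  intro l
  induction l with
  | nil => simp
  | cons b t ih =>
    intro acc x
    rw [List.foldl_cons, ih, hF, List.exists_mem_cons_iff]
    tauto

theorem pv_mem_pvStep (ws : List String) (fr : PySem.Set (Nat × Nat × Nat))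
    (x : Nat × Nat × Nat) :
    x ∈ pvStep ws fr ↔ ∃ st ∈ fr, ∃ j ∈ List.range ws.length,
      (((st.2.1 >>> j) % 2 == 0) &&
        (pvFirst (pvAt ws j) == pvLast (pvAt ws st.2.2))) = true ∧
      x = (st.1, st.2.1 ||| (1 <<< j), j) := by
  unfold pvStep
  rw [pv_mem_foldl_accum _
      (fun st x => ∃ j ∈ List.range ws.length,
        (((st.2.1 >>> j) % 2 == 0) &&
          (pvFirst (pvAt ws j) == pvLast (pvAt ws st.2.2))) = true ∧
        x = (st.1, st.2.1 ||| (1 <<< j), j))]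
  · simp
  · intro acc st y
    rw [pv_mem_foldl_accum _
        (fun j y => (((st.2.1 >>> j) % 2 == 0) &&
            (pvFirst (pvAt ws j) == pvLast (pvAt ws st.2.2))) = true ∧
          y = (st.1, st.2.1 ||| (1 <<< j), j))]
    intro acc2 j z
    by_cases hc : (((st.2.1 >>> j) % 2 == 0) &&
        (pvFirst (ws[j]?.getD "") == pvLast (ws[st.2.2]?.getD ""))) = true
    · rw [if_pos hc]
      rw [PySem.Set.mem_add]
      unfold pvAt
      tauto
    · rw [if_neg hc]
      unfold pvAt
      tauto

theorem pv_testBit_foldl (il : List Nat) (j : Nat) : ∀ (m : Nat),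
    (il.foldl (fun m i => m ||| (1 <<< i)) m).testBit j = true ↔
      m.testBit j = true ∨ j ∈ il := by
  induction il with
  | nil => simp
  | cons i t ih =>
    intro m
    rw [List.foldl_cons, ih, Nat.testBit_or, Nat.one_shiftLeft, Nat.testBit_two_pow]
    simp only [Bool.or_eq_true, decide_eq_true_eq, List.mem_cons]
    tauto

theorem pv_testBit_pvMask (il : List Nat) (j : Nat) :
    (pvMask il).testBit j = true ↔ j ∈ il := by
  unfold pvMask
  rw [pv_testBit_foldl]
  simp

theorem pv_bitfree_iff (m j : Nat) :
    ((m >>> j) % 2 == 0) = true ↔ m.testBit j = false := by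
  rw [Nat.testBit_eq_decide_div_mod_eq, Nat.shiftRight_eq_div_pow]
  simp only [beq_iff_eq, decide_eq_false_iff_not]
  omega

theorem pv_pvMask_append (il : List Nat) (j : Nat) :
    pvMask (il ++ [j]) = pvMask il ||| (1 <<< j) := by
  unfold pvMask
  rw [List.foldl_append]
  rfl

theorem pv_pvIdxPath_append (ws : List String) : ∀ (il : List Nat) (i j : Nat),
    il.getLast? = some i →
    pvIdxPath ws (il ++ [j]) =
      (pvIdxPath ws il && (pvFirst (pvAt ws j) == pvLast (pvAt ws i))) := by
  intro il
  induction il with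
  | nil => intro i j h; simp at h
  | cons a t ih =>
    intro i j h
    match t, h with
    | [], h =>
      simp only [List.getLast?_singleton, Option.some_inj] at h
      subst h
      simp [pvIdxPath, Bool.and_comm]
    | b :: t', h =>
      have hlast : (b :: t').getLast? = some i := by
        rw [← h]
        exact (List.getLast?_cons_cons ..).symm
      have := ih i j hlast
      simp only [List.cons_append, pvIdxPath] at *
      rw [this, Bool.and_assoc]

theorem pv_frontier_iff (ws : List String) (k : Nat) (st : Nat × Nat × Nat) :
    st ∈ (List.range k).foldl (fun fr _ => pvStep ws fr)
          (PySem.Set.ofList ((List.range ws.length).map (fun s => (s, 1 <<< s, s)))) ↔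
    pvStateOK ws k st := by
  induction k generalizing st with
  | zero =>
    obtain ⟨s1, m1, i1⟩ := st
    simp only [List.range_zero, List.foldl_nil, PySem.Set.mem_ofList, List.mem_map,
      List.mem_range, pvStateOK]
    constructor
    · rintro ⟨s, hs, heq⟩
      rw [Prod.mk.injEq, Prod.mk.injEq] at heq
      obtain ⟨rfl, rfl, rfl⟩ := heq
      exact ⟨[s], rfl, List.nodup_singleton s, by simpa using hs, rfl, rfl,
        by simp [pvMask], rfl⟩
    · rintro ⟨il, hlen, -, hb, hhead, hlast, hmask, -⟩
      obtain ⟨a, rfl⟩ := List.length_eq_one_iff.mp hlen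
      simp only [List.head?_cons, Option.some_inj] at hhead
      simp only [List.getLast?_singleton, Option.some_inj] at hlast
      refine ⟨a, hb a (by simp), ?_⟩
      rw [Prod.mk.injEq, Prod.mk.injEq]
      refine ⟨hhead, ?_, hlast⟩
      rw [← hmask]
      simp [pvMask]
  | succ k ih =>
    rw [List.range_succ, List.foldl_append, List.foldl_cons, List.foldl_nil,
      pv_mem_pvStep]
    obtain ⟨s1, m1, i1⟩ := st
    constructor
    · rintro ⟨st', hst', j, hj, hcond, heq⟩
      simp only [pvStateOK]
      obtain ⟨il, hlen, hnd, hb, hhead, hlast, hmask, hpath⟩ := (ih st').mp hst'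
      rw [List.mem_range] at hj
      rw [Bool.and_eq_true] at hcond
      have hjni : j ∉ il := by
        intro hmem
        have := (pv_testBit_pvMask il j).mpr hmem
        rw [hmask] at this
        rw [(pv_bitfree_iff st'.2.1 j).mp hcond.1] at this
        exact Bool.false_ne_true this
      have hilne : il ≠ [] := by
        intro hnil; rw [hnil] at hlen; simp at hlen
      rw [Prod.mk.injEq, Prod.mk.injEq] at heq
      obtain ⟨h1, h2, h3⟩ := heq
      refine ⟨il ++ [j], by simp [hlen], ?_, ?_, ?_, ?_, ?_, ?_⟩
      · rw [List.nodup_append]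
        refine ⟨hnd, List.nodup_singleton j, ?_⟩
        intro a ha b hb hab
        rw [List.mem_singleton] at hb
        subst hb
        exact hjni (hab ▸ ha)
      · intro x hx
        rcases List.mem_append.mp hx with hx | hx
        · exact hb x hx
        · simp only [List.mem_singleton] at hx; omega
      · rw [List.head?_append_of_ne_nil il hilne, hhead, ← h1]
      · rw [List.getLast?_concat, h3]
      · rw [pv_pvMask_append, hmask, ← h2]
      · rw [pv_pvIdxPath_append ws il st'.2.2 j hlast, hpath, Bool.true_and]
        exact hcond.2
    · rintro ⟨il', hlen, hnd, hb, hhead, hlast, hmask, hpath⟩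
      dsimp only at hhead hlast hmask
      have hne : il' ≠ [] := by
        intro hnil; rw [hnil] at hlen; simp at hlen
      set j := il'.getLast hne with hj
      set il := il'.dropLast with hil
      have hconc : il' = il ++ [j] := (List.dropLast_concat_getLast hne).symm
      have hilne : il ≠ [] := by
        intro hnil
        rw [hconc, hnil] at hlen
        simp only [List.nil_append, List.length_singleton] at hlen
        omega
      have hilnd : il.Nodup := List.Sublist.nodup (List.dropLast_sublist il') hnd
      have hjni : j ∉ il := by
        rw [hconc, List.nodup_append] at hnd
        intro hmem
        exact hnd.2.2 j hmem j (List.mem_singleton.mpr rfl) rfl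
      have hlasti : il.getLast? = some (il.getLast hilne) :=
        List.getLast?_eq_some_getLast hilne
      have hpathsplit :
          pvIdxPath ws il = true ∧
          (pvFirst (pvAt ws j) == pvLast (pvAt ws (il.getLast hilne))) = true := by
        rw [hconc] at hpath
        rw [pv_pvIdxPath_append ws il (il.getLast hilne) j hlasti,
          Bool.and_eq_true] at hpath
        exact hpath
      have hstmem : (s1, pvMask il, il.getLast hilne) ∈
          (List.range k).foldl (fun fr _ => pvStep ws fr)
            (PySem.Set.ofList ((List.range ws.length).map (fun s => (s, 1 <<< s, s)))) := by
        apply (ih _).mpr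
        refine ⟨il, ?_, hilnd, ?_, ?_, hlasti, rfl, hpathsplit.1⟩
        · have := congrArg List.length hconc
          simp only [List.length_append, List.length_cons, List.length_nil] at this
          omega
        · intro x hx
          exact hb x (by rw [hconc]; exact List.mem_append.mpr (Or.inl hx))
        · rw [← hhead, hconc, List.head?_append_of_ne_nil il hilne]
      refine ⟨(s1, pvMask il, il.getLast hilne), hstmem, j, ?_, ?_, ?_⟩
      · rw [List.mem_range]
        exact hb j (by rw [hconc]; simp)
      · rw [Bool.and_eq_true]
        constructor
        · rw [pv_bitfree_iff]
          rw [Bool.eq_false_iff]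
          intro htb
          exact hjni ((pv_testBit_pvMask il j).mp htb)
        · exact hpathsplit.2
      · rw [Prod.mk.injEq, Prod.mk.injEq]
        refine ⟨rfl, ?_, ?_⟩
        · show m1 = pvMask il ||| 1 <<< j
          rw [← hmask, hconc, pv_pvMask_append]
        · have h5 : some i1 = some j := by
            rw [← hlast, List.getLast?_eq_some_getLast hne]
          exact Option.some_inj.mp h5
      

theorem pv_mem_of_bounded (n : Nat) (il : List Nat) (hnd : il.Nodup)
    (hb : ∀ j ∈ il, j < n) (hl : il.length = n) (j : Nat) :
    j ∈ il ↔ j < n := by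
  have hsub : il.toFinset ⊆ Finset.range n := by
    intro x hx
    rw [Finset.mem_range]
    exact hb x (List.mem_toFinset.mp hx)
  have hcard : (Finset.range n).card ≤ il.toFinset.card := by
    rw [Finset.card_range, List.toFinset_card_of_nodup hnd, hl]
  have heq : il.toFinset = Finset.range n := Finset.eq_of_subset_of_card_le hsub hcard
  rw [← List.mem_toFinset, heq, Finset.mem_range]

theorem pv_perm_range (n : Nat) (il : List Nat) (hnd : il.Nodup)
    (hb : ∀ j ∈ il, j < n) (hl : il.length = n) :
    il.Perm (List.range n) := by
  apply List.perm_of_nodup_nodup_toFinset_eq hnd (List.nodup_range)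
  rw [List.toFinset_range]
  apply Finset.eq_of_subset_of_card_le
  · intro x hx
    rw [Finset.mem_range]
    exact hb x (List.mem_toFinset.mp hx)
  · rw [Finset.card_range, List.toFinset_card_of_nodup hnd, hl]

theorem pv_pvMask_full (n : Nat) (il : List Nat) (hnd : il.Nodup)
    (hb : ∀ j ∈ il, j < n) (hl : il.length = n) :
    pvMask il = 2 ^ n - 1 := by
  apply Nat.eq_of_testBit_eq
  intro j
  rw [Nat.testBit_two_pow_sub_one]
  by_cases hj : j < n
  · rw [(pv_testBit_pvMask il j).mpr ((pv_mem_of_bounded n il hnd hb hl j).mpr hj)]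
    simp [hj]
  · have : ¬ j ∈ il := fun h => hj (hb j h)
    have h2 : (pvMask il).testBit j ≠ true := fun h => this ((pv_testBit_pvMask il j).mp h)
    simp only [Bool.not_eq_true] at h2
    rw [h2]
    simp [hj]

theorem pv_at_range (ws : List String) :
    (List.range ws.length).map (pvAt ws) = ws := by
  apply List.ext_getElem
  · simp
  · intro i h1 h2
    simp [pvAt, List.getElem?_eq_getElem h2]

theorem pv_at_idxOf (ws : List String) (w : String) (hw : w ∈ ws) :
    pvAt ws (List.idxOf w ws) = w := by
  unfold pvAt
  rw [List.getElem?_eq_getElem (List.idxOf_lt_length_of_mem hw)]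
  simp [List.getElem_idxOf]

theorem pv_chain_path (ws : List String) (first : String) :
    ∀ (t : List Nat) (i : Nat),
      pvChain first (pvAt ws i) (t.map (pvAt ws)) =
        (pvIdxPath ws (i :: t) &&
          (pvLast (pvAt ws ((i :: t).getLast (by simp))) == pvFirst first)) := by
  intro t
  induction t with
  | nil => intro i; simp [pvChain, pvIdxPath]
  | cons j t' ih =>
    intro i
    simp only [List.map_cons, pvChain, pvIdxPath]
    rw [ih j, List.getLast_cons_cons, Bool.and_assoc]

theorem pvSearch_iff (ws : List String) (first prev : String) :
    pvSearch ws first prev = true ↔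
      ∃ l, l.Perm ws ∧ pvChain first prev l = true := by
  rw [pvSearch]
  by_cases h : ws = []
  · subst h
    simp only [reduceIte]
    constructor
    · intro hb
      exact ⟨[], List.Perm.refl [], by simpa [pvChain] using hb⟩
    · rintro ⟨l, hperm, hchain⟩
      rw [List.perm_nil] at hperm
      subst hperm
      simpa [pvChain] using hchain
  · rw [if_neg h, List.any_eq_true]
    constructor
    · rintro ⟨⟨w, hw⟩, -, hcond⟩
      rw [Bool.and_eq_true] at hcond
      obtain ⟨l', hperm, hchain⟩ := (pvSearch_iff (ws.erase w) first w).mp hcond.2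
      refine ⟨w :: l', ?_, ?_⟩
      · exact ((hperm.cons w).trans (List.perm_cons_erase hw).symm)
      · simp [pvChain, hcond.1, hchain]
    · rintro ⟨l, hperm, hchain⟩
      have hlne : l ≠ [] := by
        intro hl
        subst hl
        exact h (List.perm_nil.mp hperm.symm)
      obtain ⟨w, t, rfl⟩ := List.ne_nil_iff_exists_cons.mp hlne
      have hw : w ∈ ws := hperm.subset List.mem_cons_self
      refine ⟨⟨w, hw⟩, List.mem_attach _ _, ?_⟩
      rw [Bool.and_eq_true]
      simp only [pvChain, Bool.and_eq_true] at hchain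
      refine ⟨hchain.1, ?_⟩
      exact (pvSearch_iff (ws.erase w) first w).mpr
        ⟨t, (List.cons_perm_iff_perm_erase.mp hperm).2, hchain.2⟩
termination_by ws.length
decreasing_by
  all_goals
    have h1 : (ws.erase w).length = ws.length - 1 := List.length_erase_of_mem hw
    have h2 : 0 < ws.length := List.length_pos_of_mem hw
    omega

theorem pv_A_any_iff (S : List String) :
    (S.attach.any (fun x => pvSearch (S.erase x.1) x.1 x.1)) = true ↔
      ∃ l, l.Perm S ∧ pvCyc l = true := by
  rw [List.any_eq_true]
  constructor
  · rintro ⟨⟨w, hw⟩, -, hsearch⟩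
    obtain ⟨l, hperm, hchain⟩ := (pvSearch_iff (S.erase w) w w).mp hsearch
    refine ⟨w :: l, ?_, hchain⟩
    exact (hperm.cons w).trans (List.perm_cons_erase hw).symm
  · rintro ⟨l, hperm, hcyc⟩
    match l, hcyc with
    | w :: t, hcyc =>
      have hw : w ∈ S := hperm.subset List.mem_cons_self
      refine ⟨⟨w, hw⟩, List.mem_attach _ _, ?_⟩
      exact (pvSearch_iff (S.erase w) w w).mpr
        ⟨t, (List.cons_perm_iff_perm_erase.mp hperm).2, hcyc⟩

theorem pv_B_any_iff (ws : List String) (hnd : ws.Nodup) (hne : ws ≠ []) :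
    (((List.range (ws.length - 1)).foldl (fun fr _ => pvStep ws fr)
        (PySem.Set.ofList ((List.range ws.length).map (fun s => (s, 1 <<< s, s))))).any
      (fun st => st.2.1 == (1 <<< ws.length) - 1 &&
        (pvLast (ws[st.2.2]?.getD "") == pvFirst (ws[st.1]?.getD "")))) = true ↔
      ∃ l, l.Perm ws ∧ pvCyc l = true := by
  have hn : 0 < ws.length := List.length_pos_of_ne_nil hne
  rw [List.any_eq_true]
  constructor
  · rintro ⟨⟨s, m, i⟩, hmem, hcond⟩
    obtain ⟨il, hlen, hilnd, hb, hhead, hlast, hmask, hpath⟩ :=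
      (pv_frontier_iff ws (ws.length - 1) _).mp hmem
    dsimp only at hhead hlast hmask hcond
    have hlen' : il.length = ws.length := by omega
    rw [Bool.and_eq_true] at hcond
    refine ⟨il.map (pvAt ws), ?_, ?_⟩
    · exact ((pv_perm_range ws.length il hilnd hb hlen').map (pvAt ws)).trans
        (by rw [pv_at_range])
    · obtain ⟨t, rfl⟩ := List.head?_eq_some_iff.mp hhead
      simp only [List.map_cons, pvCyc]
      rw [pv_chain_path ws (pvAt ws s) t s, Bool.and_eq_true]
      have hglsome : some ((s :: t).getLast (by simp)) = some i := by
        rw [← List.getLast?_eq_some_getLast (l := s :: t) (by simp), hlast]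
      have hgl : (s :: t).getLast (by simp) = i := Option.some_inj.mp hglsome
      refine ⟨hpath, ?_⟩
      rw [hgl]
      exact hcond.2
  · rintro ⟨l, hperm, hcyc⟩
    have hlnd : l.Nodup := List.Perm.nodup hperm.symm hnd
    have hlne2 : l ≠ [] := by
      intro h0
      subst h0
      exact hne (List.perm_nil.mp hperm.symm)
    obtain ⟨w, t, rfl⟩ := List.ne_nil_iff_exists_cons.mp hlne2
    have hsub : ∀ x ∈ w :: t, x ∈ ws := fun x hx => hperm.subset hx
    have hmapback : ((w :: t).map (fun x => List.idxOf x ws)).map (pvAt ws) = w :: t := by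
      rw [List.map_map]
      calc (w :: t).map (pvAt ws ∘ fun x => List.idxOf x ws)
          = (w :: t).map id :=
            List.map_congr_left (fun x hx => pv_at_idxOf ws x (hsub x hx))
        _ = w :: t := List.map_id (w :: t)
    have hlen : ((w :: t).map (fun x => List.idxOf x ws)).length = ws.length := by
      rw [List.length_map]
      exact hperm.length_eq
    have hilnd : ((w :: t).map (fun x => List.idxOf x ws)).Nodup :=
      (List.nodup_map_iff_inj_on hlnd).mpr
        (fun x hx y _ hxy => (List.idxOf_inj (hsub x hx)).mp hxy)
    have hbnd : ∀ j ∈ (w :: t).map (fun x => List.idxOf x ws), j < ws.length := by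
      intro j hj
      obtain ⟨x, hx, rfl⟩ := List.mem_map.mp hj
      exact List.idxOf_lt_length_of_mem (hsub x hx)
    have hmapne : (w :: t).map (fun x => List.idxOf x ws) ≠ [] := by simp
    have hgl : ((w :: t).map (fun x => List.idxOf x ws)).getLast hmapne =
        List.idxOf ((w :: t).getLast (by simp)) ws := List.getLast_map hmapne
    have hchain :
        (pvIdxPath ws (List.idxOf w ws :: t.map (fun x => List.idxOf x ws)) &&
          (pvLast (pvAt ws ((List.idxOf w ws :: t.map (fun x => List.idxOf x ws)).getLast
            (by simp))) == pvFirst w)) = true := by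
      rw [← pv_chain_path ws w (t.map (fun x => List.idxOf x ws)) (List.idxOf w ws)]
      have h1 : pvAt ws (List.idxOf w ws) = w := pv_at_idxOf ws w (hsub w List.mem_cons_self)
      have h2 : (t.map (fun x => List.idxOf x ws)).map (pvAt ws) = t := by
        have := hmapback
        simp only [List.map_cons, List.cons.injEq] at this
        exact this.2
      rw [h1, h2]
      exact hcyc
    rw [Bool.and_eq_true] at hchain
    refine ⟨(List.idxOf w ws,
        pvMask ((w :: t).map (fun x => List.idxOf x ws)),
        List.idxOf ((w :: t).getLast (by simp)) ws), ?_, ?_⟩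
    · apply (pv_frontier_iff ws (ws.length - 1) _).mpr
      refine ⟨(w :: t).map (fun x => List.idxOf x ws), by omega, hilnd, hbnd, ?_, ?_, rfl, ?_⟩
      · simp
      · rw [List.getLast?_eq_some_getLast hmapne, hgl]
      · exact hchain.1
    · dsimp only
      rw [Bool.and_eq_true]
      constructor
      · rw [beq_iff_eq, pv_pvMask_full ws.length _ hilnd hbnd hlen, Nat.one_shiftLeft]
      · show (pvLast (pvAt ws (List.idxOf ((w :: t).getLast (by simp)) ws)) ==
          pvFirst (pvAt ws (List.idxOf w ws))) = true
        rw [pv_at_idxOf ws _ (hsub _ (List.getLast_mem (by simp))),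
          pv_at_idxOf ws w (hsub w List.mem_cons_self)]
        have h3 : (pvLast (pvAt ws ((List.map (fun x => List.idxOf x ws)
            (w :: t)).getLast hmapne)) == pvFirst w) = true := by
          simpa only [List.map_cons] using hchain.2
        rw [hgl, pv_at_idxOf ws _ (hsub _ (List.getLast_mem (by simp)))] at h3
        exact h3

theorem pv_main (words : List String) :
    can_form_a_circle words = can_form_a_circle_alt words := by
  unfold can_form_a_circle can_form_a_circle_alt
  simp only [PySem.List.dedup_eq_ofList]
  by_cases hpref : ((PySem.Dict.values (words.foldl
      (fun d w => PySem.Dict.modify (PySem.Dict.modify d (pvFirst w) 0 (· + 1))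
        (pvLast w) 0 (· + 1))
      PySem.Dict.empty)).any (fun v => decide (v < 2))) = true
  · rw [if_pos hpref, if_pos hpref]
  · rw [if_neg hpref, if_neg hpref]
    by_cases hz : PySem.Set.ofList words = ([] : List String)
    · rw [hz]
      simp
    · have hzlen : ((PySem.Set.ofList words).length == 0) = false := by
        simp [List.length_eq_zero_iff, hz]
      rw [if_neg (by simp [hzlen])]
      rw [Bool.eq_iff_iff]
      rw [pv_A_any_iff (PySem.Set.ofList words),
        pv_B_any_iff (PySem.Set.ofList words) (PySem.Set.nodup_ofList words) hz]

-- ===== VERDICT (by name: the statement is the Claim_ definition above) =====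
theorem can_form_a_circle_spec : Claim_equal_can_form_a_circle := by
  intro words _ _
  unfold Spec_can_form_a_circle
  exact pv_main words
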